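-- pv_equiv track=rewrite | github.com/volchek903/WearAI | app/utils/kie_kling_client.py | _prefer_video_url
-- ===== SOURCE A (Python) =====
-- from typing import Any, Optional
--
-- def _prefer_video_url(urls: list[str]) -> Optional[str]:
--     """
--     Предпочитаем "настоящий" видеоконтейнер, а не gif-превью.
--     """
--     if not urls:
--         return None
--
--     preferred_exts = (".mp4", ".mov", ".webm", ".m4v")
--     for u in urls:
--         base = u.split("?", 1)[0].lower()
--         if base.endswith(preferred_exts):
--             return u
--
--     # Если нет "явного" расширения — стараемся хотя бы не gif
--     for u in urls:
--         base = u.split("?", 1)[0].lower()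
--         if not base.endswith(".gif"):
--             return u
--
--     return urls[0]
-- ===== SOURCE B (Python) =====
-- from typing import Optional
--
-- def _prefer_video_url(urls: list[str]) -> Optional[str]:
--     # Single pass: return immediately on a preferred extension; otherwise
--     # remember the first non-gif URL as a fallback candidate.
--     if not urls:
--         return None
--     preferred_exts = (".mp4", ".mov", ".webm", ".m4v")
--     candidate = None
--     for u in urls:
--         base = u.split("?", 1)[0].lower()
--         if base.endswith(preferred_exts):
--             return u
--         if candidate is None and not base.endswith(".gif"):
--             candidate = u
--     return candidate if candidate is not None else urls[0]
-- ===== Notes on version B (the rewrite author's own statement) =====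
-- stated objective: alternative
-- what changed: Replaced A's two sequential scans (first for preferred extensions, then for non-gif) with a single pass that returns immediately on a preferred URL and maintains one first-non-gif fallback candidate.
import Mathlib
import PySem

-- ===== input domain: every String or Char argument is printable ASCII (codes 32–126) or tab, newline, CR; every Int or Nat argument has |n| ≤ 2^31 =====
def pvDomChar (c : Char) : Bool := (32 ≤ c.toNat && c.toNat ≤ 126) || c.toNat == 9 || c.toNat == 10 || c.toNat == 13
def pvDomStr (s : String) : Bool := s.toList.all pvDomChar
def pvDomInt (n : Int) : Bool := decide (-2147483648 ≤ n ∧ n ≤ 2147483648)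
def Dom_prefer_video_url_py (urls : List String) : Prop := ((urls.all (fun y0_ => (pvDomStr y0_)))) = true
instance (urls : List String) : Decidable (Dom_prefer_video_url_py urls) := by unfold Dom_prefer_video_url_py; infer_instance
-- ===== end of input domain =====

-- B replaces A's two sequential scans with one pass keeping a single fallback candidate (alternative decomposition, same cost).


-- ===== PORT A =====
-- base = u.split("?", 1)[0].lower()  (split with a non-empty separator always yields a non-empty list, so [0] is its head)
def pvBaseA (u : String) : String :=
  PySem.Str.lower (((PySem.Str.splitMax? u "?" 1).getD [u]).headD u)

-- base.endswith((".mp4", ".mov", ".webm", ".m4v"))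
def pvPreferredA (b : String) : Bool :=
  PySem.Str.endswith b ".mp4" || PySem.Str.endswith b ".mov" ||
  PySem.Str.endswith b ".webm" || PySem.Str.endswith b ".m4v"

def prefer_video_url_py (urls : List String) : Option String :=
  if urls = [] then none
  else
    match urls.find? (fun u => pvPreferredA (pvBaseA u)) with
    | some u => some u
    | none =>
      match urls.find? (fun u => !(PySem.Str.endswith (pvBaseA u) ".gif")) with
      | some u => some u
      | none => urls.head?

-- ===== PORT B =====
def pvBaseB (u : String) : String :=
  PySem.Str.lower (((PySem.Str.splitMax? u "?" 1).getD [u]).headD u)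

def pvPreferredB (b : String) : Bool :=
  PySem.Str.endswith b ".mp4" || PySem.Str.endswith b ".mov" ||
  PySem.Str.endswith b ".webm" || PySem.Str.endswith b ".m4v"

-- the single pass: early return on a preferred url, else record the first non-gif url
def pvAltLoop : List String → Option String → Option String
  | [], cand => cand
  | u :: rest, cand =>
    let b := pvBaseB u
    if pvPreferredB b then some u
    else if cand.isNone && !(PySem.Str.endswith b ".gif") then pvAltLoop rest (some u)
    else pvAltLoop rest cand

def prefer_video_url_py_alt (urls : List String) : Option String :=
  match urls with
  | [] => none
  | u0 :: _ =>
    match pvAltLoop urls none with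
    | some u => some u
    | none => some u0

-- ===== PRECONDITION & SPEC =====
def Spec_prefer_video_url_py (urls : List String) (out : Option String) : Prop := out = prefer_video_url_py_alt urls
instance (urls : List String) (out : Option String) : Decidable (Spec_prefer_video_url_py urls out) := by unfold Spec_prefer_video_url_py; infer_instance

-- ===== CLAIM (what is proved, stated in full; the proofs are below) =====
def Claim_equal_prefer_video_url_py : Prop := ∀ (urls : List String), Dom_prefer_video_url_py urls → Spec_prefer_video_url_py urls (prefer_video_url_py urls)

-- ===== LEMMAS AND PROOFS =====

theorem pvAltLoop_char (l : List String) : ∀ (cand : Option String),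
    pvAltLoop l cand =
      match l.find? (fun u => pvPreferredB (pvBaseB u)) with
      | some u => some u
      | none =>
        match cand with
        | some c => some c
        | none => l.find? (fun u => !(PySem.Str.endswith (pvBaseB u) ".gif")) := by
  induction l with
  | nil => intro cand; cases cand <;> simp [pvAltLoop]
  | cons u rest ih =>
    intro cand
    by_cases hp : pvPreferredB (pvBaseB u) = true
    · simp [pvAltLoop, List.find?, hp]
    · have hp' : pvPreferredB (pvBaseB u) = false := by
        cases h : pvPreferredB (pvBaseB u) <;> simp_all
      cases cand with
      | some c => simp [pvAltLoop, List.find?, hp', ih]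
      | none =>
        cases hg : PySem.Str.endswith (pvBaseB u) ".gif" with
        | true =>
          simp at hg
          simp [pvAltLoop, List.find?, hp', hg, ih]
        | false =>
          simp at hg
          simp [pvAltLoop, List.find?, hp', hg, ih]

theorem pvBase_eq : pvBaseA = pvBaseB := rfl
theorem pvPreferred_eq : pvPreferredA = pvPreferredB := rfl

-- ===== VERDICT (by name: the statement is the Claim_ definition above) =====
theorem prefer_video_url_py_spec : Claim_equal_prefer_video_url_py := by
  intro urls _
  unfold Spec_prefer_video_url_py prefer_video_url_py prefer_video_url_py_alt
  cases urls with
  | nil => simp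
  | cons u0 rest =>
    rw [pvAltLoop_char (u0 :: rest) none, if_neg (List.cons_ne_nil u0 rest), pvBase_eq, pvPreferred_eq]
    cases h1 : (u0 :: rest).find? (fun u => pvPreferredB (pvBaseB u)) with
    | some u => rfl
    | none =>
      cases h2 : (u0 :: rest).find? (fun u => !(PySem.Str.endswith (pvBaseB u) ".gif")) with
      | some u => rfl
      | none => rfl
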